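-- pv_equiv track=rewrite | github.com/mumtazlodhra11/PDFMasterTool | google-cloud-run/pdf_to_excel_engine/excel_builder.py | _trim_empty_columns
-- ===== SOURCE A (Python) =====
-- from typing import Dict, Iterable, List, Tuple
--
-- def _trim_empty_columns(rows: List[List[str]]) -> List[List[str]]:
--     if not rows:
--         return rows
--
--     col_count = max(len(row) for row in rows)
--     if col_count == 0:
--         return rows
--
--     def column_has_data(idx: int) -> bool:
--         for row in rows:
--             if idx < len(row) and str(row[idx]).strip():
--                 return True
--         return False
--
--     start = 0
--     while start < col_count and not column_has_data(start):
--         start += 1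
--
--     if start == col_count:
--         return []
--
--     end = col_count - 1
--     while end >= start and not column_has_data(end):
--         end -= 1
--
--     if start == 0 and end == col_count - 1:
--         return rows
--
--     trimmed = []
--     for row in rows:
--         trimmed.append(row[start : end + 1])
--     return trimmed
-- ===== SOURCE B (Python) =====
-- from typing import List
--
-- def _trim_empty_columns(rows: List[List[str]]) -> List[List[str]]:
--     if not rows:
--         return rows
--
--     col_count = max(len(row) for row in rows)
--     if col_count == 0:
--         return rows
--
--     # One pass over all cells: track the smallest and largest column index
--     # that holds non-whitespace data.
--     min_idx = None
--     max_idx = None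
--     for row in rows:
--         for i, cell in enumerate(row):
--             if str(cell).strip():
--                 if min_idx is None:
--                     min_idx, max_idx = i, i
--                 else:
--                     min_idx = min(min_idx, i)
--                     max_idx = max(max_idx, i)
--
--     if min_idx is None:
--         return []
--     if min_idx == 0 and max_idx == col_count - 1:
--         return rows
--     return [row[min_idx : max_idx + 1] for row in rows]
-- ===== Notes on version B (the rewrite author's own statement) =====
-- stated objective: simpler
-- what changed: Replaced A's per-column probing (two while loops each rescanning all rows via column_has_data) with a single pass over all cells that tracks the min and max column index holding data.
import Mathlib
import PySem

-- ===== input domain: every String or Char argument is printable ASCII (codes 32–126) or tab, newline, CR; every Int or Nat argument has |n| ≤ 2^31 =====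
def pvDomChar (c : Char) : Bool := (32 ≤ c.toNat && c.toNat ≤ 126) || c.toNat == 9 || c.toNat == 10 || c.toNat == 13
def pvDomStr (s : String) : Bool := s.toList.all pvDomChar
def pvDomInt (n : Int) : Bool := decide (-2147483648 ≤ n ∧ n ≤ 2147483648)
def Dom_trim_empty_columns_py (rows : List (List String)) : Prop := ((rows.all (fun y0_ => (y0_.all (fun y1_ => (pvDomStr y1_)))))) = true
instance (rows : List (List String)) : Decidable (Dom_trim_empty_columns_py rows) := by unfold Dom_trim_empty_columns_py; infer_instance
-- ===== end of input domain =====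

-- B replaces A's per-column probing (two while loops, each rescanning the rows) by a single
-- pass over all cells tracking the min/max data column index; objective: simpler.

-- ===== PORT A =====
-- truthiness of str(cell).strip()
def pvCellHasData (c : String) : Bool := PySem.Str.strip c != ""

-- A's column_has_data: early-returning for-loop over rows = List.any
def pvColHasData (rows : List (List String)) (idx : Nat) : Bool :=
  rows.any (fun row => decide (idx < row.length) && pvCellHasData (row.getD idx ""))

-- A's first while loop
def pvWhileStart (rows : List (List String)) (cc : Nat) (start : Nat) : Nat :=
  if h : start < cc ∧ pvColHasData rows start = false then pvWhileStart rows cc (start + 1)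
  else start
termination_by cc - start
decreasing_by omega

-- A's second while loop (Python `end` is an int that may reach start - 1)
def pvWhileEnd (rows : List (List String)) (start : Nat) (e : Int) : Int :=
  if h : (start : Int) ≤ e ∧ pvColHasData rows e.toNat = false then pvWhileEnd rows start (e - 1)
  else e
termination_by (e + 1 - start).toNat
decreasing_by omega

def trim_empty_columns_py (rows : List (List String)) : List (List String) :=
  match rows with
  | [] => rows
  | r :: rs =>
    let cc := (rs.map List.length).foldl max r.length   -- max(len(row) for row in rows)
    if cc = 0 then r :: rs
    else
      let start := pvWhileStart (r :: rs) cc 0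
      if start = cc then []
      else
        let e := pvWhileEnd (r :: rs) start ((cc : Int) - 1)
        if start = 0 ∧ e = (cc : Int) - 1 then r :: rs
        else
          (r :: rs).foldl
            (fun acc row => acc ++ [PySem.List.slice row (some (start : Int)) (some (e + 1))]) []

-- ===== PORT B =====
-- inner body of B's cell loop: update (min_idx, max_idx)
def pvScanStep (acc : Option (Int × Int)) (p : Int × String) : Option (Int × Int) :=
  if pvCellHasData p.2 then
    match acc with
    | none => some (p.1, p.1)
    | some (mn, mx) => some (min mn p.1, max mx p.1)
  else acc

def trim_empty_columns_py_alt (rows : List (List String)) : List (List String) :=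
  match rows with
  | [] => rows
  | r :: rs =>
    let cc := (rs.map List.length).foldl max r.length   -- max(len(row) for row in rows)
    if cc = 0 then r :: rs
    else
      match (r :: rs).foldl (fun acc row => (PySem.List.enumerate row 0).foldl pvScanStep acc) none with
      | none => []
      | some (mn, mx) =>
        if mn = 0 ∧ mx = (cc : Int) - 1 then r :: rs
        else (r :: rs).map (fun row => PySem.List.slice row (some mn) (some (mx + 1)))

-- ===== PRECONDITION & SPEC =====
def Spec_trim_empty_columns_py (rows : List (List String)) (out : List (List String)) : Prop := out = trim_empty_columns_py_alt rows
instance (rows : List (List String)) (out : List (List String)) : Decidable (Spec_trim_empty_columns_py rows out) := by unfold Spec_trim_empty_columns_py; infer_instance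

-- ===== CLAIM (what is proved, stated in full; the proofs are below) =====
def Claim_equal_trim_empty_columns_py : Prop := ∀ (rows : List (List String)), Dom_trim_empty_columns_py rows → Spec_trim_empty_columns_py rows (trim_empty_columns_py rows)

-- ===== LEMMAS AND PROOFS =====
def pvDataIdx (rows : List (List String)) : List Int :=
  rows.flatMap (fun row =>
    (PySem.List.enumerate row 0).filterMap (fun p => if pvCellHasData p.2 then some p.1 else none))

def pvStep (acc : Option (Int × Int)) (i : Int) : Option (Int × Int) :=
  match acc with
  | none => some (i, i)
  | some (mn, mx) => some (min mn i, max mx i)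

theorem pvScan_row (l : List (Int × String)) (acc : Option (Int × Int)) :
    l.foldl pvScanStep acc
      = (l.filterMap (fun p => if pvCellHasData p.2 then some p.1 else none)).foldl pvStep acc := by
  induction l generalizing acc with
  | nil => rfl
  | cons p t ih =>
    by_cases h : pvCellHasData p.2 = true
    · cases acc with
      | none => simp [pvScanStep, pvStep, h, ih]
      | some q => obtain ⟨a, b⟩ := q; simp [pvScanStep, pvStep, h, ih]
    · simp only [Bool.not_eq_true] at h
      simp [pvScanStep, h, ih]

theorem pvScan_eq (rows : List (List String)) (acc : Option (Int × Int)) :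
    rows.foldl (fun acc row => (PySem.List.enumerate row 0).foldl pvScanStep acc) acc
      = (pvDataIdx rows).foldl pvStep acc := by
  induction rows generalizing acc with
  | nil => rfl
  | cons r t ih =>
    simp only [List.foldl_cons, pvDataIdx, List.flatMap_cons, List.foldl_append]
    rw [pvScan_row, ih]
    rfl

theorem pvStep_some (t : List Int) (mn mx : Int) :
    t.foldl pvStep (some (mn, mx)) = some (t.foldl min mn, t.foldl max mx) := by
  induction t generalizing mn mx with
  | nil => rfl
  | cons i t ih => simp [pvStep, ih]

theorem pvMem_dataIdx (rows : List (List String)) (k : Nat) :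
    ((k : Int) ∈ pvDataIdx rows) ↔ pvColHasData rows k = true := by
  simp only [pvDataIdx, List.mem_flatMap, List.mem_filterMap, pvColHasData, List.any_eq_true,
    Bool.and_eq_true, decide_eq_true_eq]
  constructor
  · rintro ⟨row, hrow, p, hp, hcell⟩
    split_ifs at hcell with hc
    rcases (PySem.List.mem_enumerate_iff _ _ _).1 hp with ⟨j, hj, rfl⟩
    simp only [Option.some.injEq] at hcell
    have hjk : j = k := by omega
    subst hjk
    refine ⟨row, hrow, hj, ?_⟩
    rw [List.getD_eq_getElem?_getD, List.getElem?_eq_getElem hj]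
    simpa using hc
  · rintro ⟨row, hrow, hk, hc⟩
    refine ⟨row, hrow, ((k : Int), row[k]), ?_, ?_⟩
    · exact (PySem.List.mem_enumerate_iff _ _ _).2 ⟨k, hk, by simp⟩
    · rw [List.getD_eq_getElem?_getD, List.getElem?_eq_getElem hk] at hc
      simpa using hc

theorem pvDataIdx_nonneg (rows : List (List String)) : ∀ i ∈ pvDataIdx rows, 0 ≤ i := by
  intro i hi
  simp only [pvDataIdx, List.mem_flatMap, List.mem_filterMap] at hi
  rcases hi with ⟨row, _, p, hp, hcell⟩
  split_ifs at hcell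
  rcases (PySem.List.mem_enumerate_iff _ _ _).1 hp with ⟨j, hj, hpj⟩
  simp only [Option.some.injEq] at hcell
  subst hpj
  simp only at hcell
  omega
theorem pvWhileStart_eq (rows : List (List String)) (cc m : Nat) (hm : m ≤ cc)
    (hstop : m = cc ∨ pvColHasData rows m = true) :
    ∀ s, s ≤ m → (∀ i, s ≤ i → i < m → pvColHasData rows i = false) →
    pvWhileStart rows cc s = m := by
  intro s hs hmin
  induction hd : m - s generalizing s with
  | zero =>
    have : s = m := by omega
    subst this
    rw [pvWhileStart]
    rcases hstop with h | h
    · simp [h]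
    · simp [h]
  | succ n ih =>
    have hsm : s < m := by omega
    have hds : pvColHasData rows s = false := hmin s le_rfl hsm
    rw [pvWhileStart]
    have : s < cc := by omega
    simp only [this, hds, and_self, dif_pos]
    exact ih (s + 1) (by omega) (fun i h1 h2 => hmin i (by omega) h2) (by omega)

theorem pvWhileEnd_eq (rows : List (List String)) (start M : Nat) (hsm : start ≤ M)
    (hDM : pvColHasData rows M = true) :
    ∀ e : Int, (M : Int) ≤ e → (∀ i : Nat, M < i → (i : Int) ≤ e → pvColHasData rows i = false) →
    pvWhileEnd rows start e = (M : Int) := by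
  intro e he hmax
  induction hd : (e - M).toNat generalizing e with
  | zero =>
    have : e = (M : Int) := by omega
    subst this
    rw [pvWhileEnd]
    have : Int.toNat (M : Int) = M := by omega
    rw [this]
    simp [hDM]
  | succ n ih =>
    have hMe : (M : Int) < e := by omega
    have h0 : 0 ≤ e := by omega
    have hde : pvColHasData rows e.toNat = false := hmax e.toNat (by omega) (by omega)
    rw [pvWhileEnd]
    have hse : (start : Int) ≤ e := by omega
    simp only [hse, hde, and_self, dif_pos]
    exact ih (e - 1) (by omega) (fun i h1 h2 => hmax i h1 (by omega)) (by omega)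
theorem pvColHasData_lt (r : List String) (rs : List (List String)) (k : Nat)
    (h : pvColHasData (r :: rs) k = true) :
    k < (rs.map List.length).foldl max r.length := by
  simp only [pvColHasData, List.any_eq_true, Bool.and_eq_true, decide_eq_true_eq] at h
  rcases h with ⟨row, hrow, hk, _⟩
  rcases List.mem_cons.1 hrow with rfl | hmem
  · have := (PySem.List.le_foldl_max (rs.map List.length) row.length).1
    omega
  · have : row.length ∈ rs.map List.length := List.mem_map_of_mem hmem
    have := (PySem.List.le_foldl_max (rs.map List.length) r.length).2 _ this
    omega

-- ===== VERDICT (by name: the statement is the Claim_ definition above) =====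
theorem trim_empty_columns_py_spec : Claim_equal_trim_empty_columns_py := by
  intro rows _
  unfold Spec_trim_empty_columns_py
  match rows with
  | [] => rfl
  | r :: rs =>
    simp only [trim_empty_columns_py, trim_empty_columns_py_alt]
    by_cases hcc : (rs.map List.length).foldl max r.length = 0
    · simp [hcc]
    · set cc := (rs.map List.length).foldl max r.length with hccdef
      simp only [if_neg hcc, pvScan_eq]
      cases hD : pvDataIdx (r :: rs) with
      | nil =>
        have hnone : ∀ i, pvColHasData (r :: rs) i = false := by
          intro i
          have h := pvMem_dataIdx (r :: rs) i
          rw [hD] at h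
          simp only [List.not_mem_nil, false_iff] at h
          exact Bool.eq_false_iff.2 h
        have hws : pvWhileStart (r :: rs) cc 0 = cc :=
          pvWhileStart_eq _ _ _ le_rfl (Or.inl rfl) 0 (by omega) (fun i _ _ => hnone i)
        simp [hws]
      | cons i t =>
        have hmemD : ∀ x ∈ i :: t, x ∈ pvDataIdx (r :: rs) := by rw [hD]; exact fun x hx => hx
        have hmn_mem : t.foldl min i ∈ i :: t := by
          rcases PySem.List.foldl_min_mem t i with h | h
          · rw [h]; exact List.mem_cons_self
          · exact List.mem_cons_of_mem _ h
        have hmx_mem : t.foldl max i ∈ i :: t := by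
          rcases PySem.List.foldl_max_mem t i with h | h
          · rw [h]; exact List.mem_cons_self
          · exact List.mem_cons_of_mem _ h
        have hmn_nn : 0 ≤ t.foldl min i := pvDataIdx_nonneg _ _ (hmemD _ hmn_mem)
        have hmx_nn : 0 ≤ t.foldl max i := pvDataIdx_nonneg _ _ (hmemD _ hmx_mem)
        obtain ⟨m, hm⟩ : ∃ m : Nat, t.foldl min i = (m : Int) := ⟨_, (Int.toNat_of_nonneg hmn_nn).symm⟩
        obtain ⟨M, hM⟩ : ∃ M : Nat, t.foldl max i = (M : Int) := ⟨_, (Int.toNat_of_nonneg hmx_nn).symm⟩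
        have hDm : pvColHasData (r :: rs) m = true :=
          (pvMem_dataIdx _ _).1 (hm ▸ hmemD _ hmn_mem)
        have hDM : pvColHasData (r :: rs) M = true :=
          (pvMem_dataIdx _ _).1 (hM ▸ hmemD _ hmx_mem)
        have hmin_all : ∀ x ∈ i :: t, t.foldl min i ≤ x := by
          intro x hx
          rcases List.mem_cons.1 hx with rfl | hx
          · exact (PySem.List.foldl_min_le t x).1
          · exact (PySem.List.foldl_min_le t i).2 _ hx
        have hmax_all : ∀ x ∈ i :: t, x ≤ t.foldl max i := by
          intro x hx
          rcases List.mem_cons.1 hx with rfl | hx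
          · exact (PySem.List.le_foldl_max t x).1
          · exact (PySem.List.le_foldl_max t i).2 _ hx
        have hmM : m ≤ M := by
          have := hmin_all _ hmx_mem
          omega
        have hm_lt : m < cc := pvColHasData_lt _ _ _ hDm
        have hM_lt : M < cc := pvColHasData_lt _ _ _ hDM
        have hlow : ∀ j : Nat, j < m → pvColHasData (r :: rs) j = false := by
          intro j hj
          refine Bool.eq_false_iff.2 (fun hDj => ?_)
          have hmem : (j : Int) ∈ pvDataIdx (r :: rs) := (pvMem_dataIdx _ _).2 hDj
          rw [hD] at hmem
          have := hmin_all _ hmem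
          omega
        have hhigh : ∀ j : Nat, M < j → pvColHasData (r :: rs) j = false := by
          intro j hj
          refine Bool.eq_false_iff.2 (fun hDj => ?_)
          have hmem : (j : Int) ∈ pvDataIdx (r :: rs) := (pvMem_dataIdx _ _).2 hDj
          rw [hD] at hmem
          have := hmax_all _ hmem
          omega
        have hws : pvWhileStart (r :: rs) cc 0 = m :=
          pvWhileStart_eq _ _ _ (by omega) (Or.inr hDm) 0 (by omega) (fun j _ hj => hlow j hj)
        have hwe : pvWhileEnd (r :: rs) m ((cc : Int) - 1) = (M : Int) :=
          pvWhileEnd_eq _ _ _ hmM hDM _ (by omega) (fun j h1 _ => hhigh j h1)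
        have hBfold : (i :: t).foldl pvStep none = some (t.foldl min i, t.foldl max i) := by
          rw [List.foldl_cons]
          exact pvStep_some t i i
        rw [hBfold, hws, hm, hM, if_neg (show ¬ m = cc by omega), hwe]
        by_cases hfull : m = 0 ∧ (M : Int) = (cc : Int) - 1
        · simp [hfull.1, hfull.2]
        · have hfullB : ¬((m : Int) = 0 ∧ (M : Int) = (cc : Int) - 1) :=
            fun h => hfull ⟨by exact_mod_cast h.1, h.2⟩
          rw [if_neg hfull]
          simp [hfull, ← List.flatMap_def, ← List.map_eq_flatMap]
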